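-- pv_equiv track=rewrite | github.com/mattcbh/personal-os | core/automation/email-triage-validator.py | extract_item_blocks
-- ===== SOURCE A (Python) =====
-- def extract_item_blocks(lines: list[str]) -> list[list[str]]:
--     blocks: list[list[str]] = []
--     current: list[str] = []
--     for line in lines:
--         stripped = line.strip()
--         is_section = stripped.startswith("## ") or stripped.startswith("### ")
--         if is_section:
--             if current:
--                 blocks.append(current)
--                 current = []
--             continue
--         if not stripped:
--             if current:
--                 blocks.append(current)
--                 current = []
--             continue
--         if current:
--             current.append(line)
--         else:
--             current = [line]
--     if current:
--         blocks.append(current)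
--     return blocks
-- ===== SOURCE B (Python) =====
-- def extract_item_blocks(lines: list[str]) -> list[list[str]]:
--     def is_sep(line: str) -> bool:
--         s = line.strip()
--         return (not s) or s.startswith("## ") or s.startswith("### ")
--     blocks: list[list[str]] = []
--     i, n = 0, len(lines)
--     while i < n:
--         if is_sep(lines[i]):
--             i += 1
--             continue
--         j = i + 1
--         while j < n and not is_sep(lines[j]):
--             j += 1
--         blocks.append(lines[i:j])
--         i = j
--     return blocks
-- ===== Notes on version B (the rewrite author's own statement) =====
-- stated objective: idiomatic
-- what changed: Replaced the accumulator-with-manual-flush state machine by a single separator predicate and a span-based scan that slices out each maximal run of non-separator lines directly.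
import Mathlib
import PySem

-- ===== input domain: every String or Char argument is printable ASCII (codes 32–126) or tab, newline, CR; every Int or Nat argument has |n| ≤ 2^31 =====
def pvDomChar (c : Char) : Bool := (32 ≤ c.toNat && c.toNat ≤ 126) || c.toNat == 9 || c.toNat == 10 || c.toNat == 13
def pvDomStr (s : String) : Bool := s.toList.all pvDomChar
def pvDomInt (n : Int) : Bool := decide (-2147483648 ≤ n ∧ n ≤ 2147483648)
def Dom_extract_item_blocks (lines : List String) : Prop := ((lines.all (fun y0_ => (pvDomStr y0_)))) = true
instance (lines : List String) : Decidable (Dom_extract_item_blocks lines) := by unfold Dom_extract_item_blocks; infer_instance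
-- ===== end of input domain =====

-- B replaces A's accumulator-with-manual-flush state machine by a separator predicate
-- and a span-based scan over maximal non-separator runs (same cost, plainer structure).

-- ===== PORT A =====
-- fold state: (blocks, current)
def pvStepA (st : List (List String) × List String) (line : String) :
    List (List String) × List String :=
  let stripped := PySem.Str.strip line
  let is_section := PySem.Str.startswith stripped "## " || PySem.Str.startswith stripped "### "
  if is_section then
    (if st.2.isEmpty then st else (st.1 ++ [st.2], []))
  else if stripped = "" then
    (if st.2.isEmpty then st else (st.1 ++ [st.2], []))
  else
    -- 'current.append(line)' and 'current = [line]' both yield current ++ [line]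
    (st.1, st.2 ++ [line])

def extract_item_blocks (lines : List String) : List (List String) :=
  let st := lines.foldl pvStepA ([], [])
  if st.2.isEmpty then st.1 else st.1 ++ [st.2]

-- ===== PORT B =====
def pvIsSep (line : String) : Bool :=
  let s := PySem.Str.strip line
  s = "" || PySem.Str.startswith s "## " || PySem.Str.startswith s "### "

-- B's index loop: skip separators; otherwise slice out the maximal non-separator run
def extract_item_blocks_alt : List String → List (List String)
  | [] => []
  | l :: ls =>
    if pvIsSep l then extract_item_blocks_alt ls
    else (l :: ls.takeWhile (fun x => !pvIsSep x)) ::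
         extract_item_blocks_alt (ls.dropWhile (fun x => !pvIsSep x))
  termination_by ls => ls.length
  decreasing_by
    · simp only [List.length_cons]; omega
    · simp only [List.length_cons]
      exact Nat.lt_succ_of_le (List.length_dropWhile_le _ _)

-- ===== PRECONDITION & SPEC =====
def Spec_extract_item_blocks (lines : List String) (out : List (List String)) : Prop := out = extract_item_blocks_alt lines
instance (lines : List String) (out : List (List String)) : Decidable (Spec_extract_item_blocks lines out) := by unfold Spec_extract_item_blocks; infer_instance

-- ===== CLAIM (what is proved, stated in full; the proofs are below) =====
def Claim_equal_extract_item_blocks : Prop := ∀ (lines : List String), Dom_extract_item_blocks lines → Spec_extract_item_blocks lines (extract_item_blocks lines)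

-- ===== LEMMAS AND PROOFS =====

-- reference shape: blocks produced from a pending run `cur` followed by `ls`
def pvS (cur : List String) : List String → List (List String)
  | [] => if cur.isEmpty then [] else [cur]
  | l :: ls =>
    if pvIsSep l then (if cur.isEmpty then pvS [] ls else cur :: pvS [] ls)
    else pvS (cur ++ [l]) ls

theorem pvStepA_eq (st : List (List String) × List String) (l : String) :
    pvStepA st l =
      if pvIsSep l then (if st.2.isEmpty then st else (st.1 ++ [st.2], []))
      else (st.1, st.2 ++ [l]) := by
  simp only [pvStepA, pvIsSep]
  by_cases h1 : PySem.Str.startswith (PySem.Str.strip l) "## " = true <;>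
    by_cases h2 : PySem.Str.startswith (PySem.Str.strip l) "### " = true <;>
    by_cases h3 : PySem.Str.strip l = "" <;>
    simp [h3]

theorem foldA_eq_pvS (ls : List String) :
    ∀ (blocks : List (List String)) (cur : List String),
      (if (ls.foldl pvStepA (blocks, cur)).2.isEmpty then (ls.foldl pvStepA (blocks, cur)).1
       else (ls.foldl pvStepA (blocks, cur)).1 ++ [(ls.foldl pvStepA (blocks, cur)).2])
        = blocks ++ pvS cur ls := by
  induction ls with
  | nil =>
    intro blocks cur
    by_cases h : cur.isEmpty <;> simp [pvS, h]
  | cons l ls ih =>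
    intro blocks cur
    simp only [List.foldl_cons, pvStepA_eq, pvS]
    by_cases hs : pvIsSep l = true
    · by_cases hc : cur.isEmpty
      · have hcur : cur = [] := by simpa [List.isEmpty_iff] using hc
        subst hcur
        simpa [hs] using ih blocks []
      · have h2 := ih (blocks ++ [cur]) []
        simp only [hs, if_true, hc, List.append_assoc] at h2 ⊢
        simpa using h2
    · simpa [hs] using ih blocks (cur ++ [l])

theorem pvS_eq_alt (ls : List String) :
    ∀ cur : List String,
      pvS cur ls =
        if cur.isEmpty then extract_item_blocks_alt ls
        else (cur ++ ls.takeWhile (fun x => !pvIsSep x)) ::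
             extract_item_blocks_alt (ls.dropWhile (fun x => !pvIsSep x)) := by
  induction ls with
  | nil =>
    intro cur
    by_cases h : cur.isEmpty <;> simp [pvS, extract_item_blocks_alt, h]
  | cons l ls ih =>
    intro cur
    by_cases hs : pvIsSep l = true
    · by_cases hc : cur.isEmpty <;>
        simp [pvS, hs, hc, ih, extract_item_blocks_alt]
    · by_cases hc : cur.isEmpty
      · have hcur : cur = [] := by simpa [List.isEmpty_iff] using hc
        subst hcur
        simp [pvS, hs, ih, extract_item_blocks_alt]
      · simp [pvS, hs, hc, ih]

-- ===== VERDICT (by name: the statement is the Claim_ definition above) =====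
theorem extract_item_blocks_spec : Claim_equal_extract_item_blocks := by
  intro lines _
  unfold Spec_extract_item_blocks
  have h := foldA_eq_pvS lines [] []
  simp only [extract_item_blocks]
  rw [h]
  simpa using pvS_eq_alt lines []
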